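-- pv_equiv track=rewrite | github.com/sombr/advent-of-code | 2024/day14/part.py | simulate_robot
-- ===== SOURCE A (Python) =====
-- def simulate_robot(robot, xsize, ysize, t):
--     (x, y), (dX, dY) = robot
--
--     for _ in range(t):
--         x += dX
--         y += dY
--
--         if x < 0:
--             x += xsize
--         if y < 0:
--             y += ysize
--
--         x = x % xsize
--         y = y % ysize
--
--     return (x,y)
-- ===== SOURCE B (Python) =====
-- def simulate_robot(robot, xsize, ysize, t):
--     # Closed form: t wrapping steps collapse to a single modular displacement.
--     (x, y), (dX, dY) = robot
--     if t <= 0: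
--         return (x, y)
--     return ((x + dX * t) % xsize, (y + dY * t) % ysize)
-- ===== Notes on version B (the rewrite author's own statement) =====
-- stated objective: faster
-- what changed: Replaced the t-iteration simulation loop by a single closed-form modular-arithmetic computation (x+dX*t)%xsize, (y+dY*t)%ysize.
import Mathlib
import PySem

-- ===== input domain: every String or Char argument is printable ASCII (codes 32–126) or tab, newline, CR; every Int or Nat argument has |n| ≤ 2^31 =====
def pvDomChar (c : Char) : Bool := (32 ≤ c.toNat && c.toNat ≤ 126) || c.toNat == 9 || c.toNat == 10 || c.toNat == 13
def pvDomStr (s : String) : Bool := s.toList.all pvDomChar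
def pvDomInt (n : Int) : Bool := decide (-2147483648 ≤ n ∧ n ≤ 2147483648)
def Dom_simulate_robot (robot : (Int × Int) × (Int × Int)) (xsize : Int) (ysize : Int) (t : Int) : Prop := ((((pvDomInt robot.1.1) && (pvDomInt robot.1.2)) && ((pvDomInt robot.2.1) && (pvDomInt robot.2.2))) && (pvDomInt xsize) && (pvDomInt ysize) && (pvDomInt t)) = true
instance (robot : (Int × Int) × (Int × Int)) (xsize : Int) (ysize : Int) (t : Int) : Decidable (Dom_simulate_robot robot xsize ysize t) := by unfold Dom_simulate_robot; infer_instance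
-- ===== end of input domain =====

-- B replaces A's t-iteration wrapping loop by one closed-form modular computation (asymptotically faster).


-- ===== PORT A =====
def simulate_robot (robot : (Int × Int) × (Int × Int)) (xsize : Int) (ysize : Int) (t : Int) : Int × Int :=
  (PySem.List.pyRange 0 t 1).foldl
    (fun (s : Int × Int) _ =>
      let x := s.1 + robot.2.1
      let y := s.2 + robot.2.2
      let x := if x < 0 then x + xsize else x
      let y := if y < 0 then y + ysize else y
      (PySem.Int.mod x xsize, PySem.Int.mod y ysize))
    robot.1

-- ===== PORT B =====
def simulate_robot_alt (robot : (Int × Int) × (Int × Int)) (xsize : Int) (ysize : Int) (t : Int) : Int × Int :=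
  if t ≤ 0 then robot.1
  else (PySem.Int.mod (robot.1.1 + robot.2.1 * t) xsize,
        PySem.Int.mod (robot.1.2 + robot.2.2 * t) ysize)

-- ===== PRECONDITION & SPEC =====
-- Pre_ excludes only inputs where Python A raises ZeroDivisionError: t > 0 with a zero grid size.
def Pre_simulate_robot (robot : (Int × Int) × (Int × Int)) (xsize : Int) (ysize : Int) (t : Int) : Prop :=
  0 < t → (xsize ≠ 0 ∧ ysize ≠ 0)
instance (robot : (Int × Int) × (Int × Int)) (xsize : Int) (ysize : Int) (t : Int) : Decidable (Pre_simulate_robot robot xsize ysize t) := by unfold Pre_simulate_robot; infer_instance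
def pvWitness_simulate_robot : ((Int × Int) × (Int × Int)) × Int × Int × Int := (((1, 2), (3, -4)), 5, 7, 3)

def Spec_simulate_robot (robot : (Int × Int) × (Int × Int)) (xsize : Int) (ysize : Int) (t : Int) (out : Int × Int) : Prop := out = simulate_robot_alt robot xsize ysize t
instance (robot : (Int × Int) × (Int × Int)) (xsize : Int) (ysize : Int) (t : Int) (out : Int × Int) : Decidable (Spec_simulate_robot robot xsize ysize t out) := by unfold Spec_simulate_robot; infer_instance

-- ===== CLAIM (what is proved, stated in full; the proofs are below) =====
def Claim_equal_simulate_robot : Prop := ∀ (robot : (Int × Int) × (Int × Int)) (xsize : Int) (ysize : Int) (t : Int), Dom_simulate_robot robot xsize ysize t → Pre_simulate_robot robot xsize ysize t → Spec_simulate_robot robot xsize ysize t (simulate_robot robot xsize ysize t)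

-- ===== LEMMAS AND PROOFS =====

-- Python mod of congruent arguments agrees (any nonzero divisor).
theorem pymod_congr (a₁ a₂ b : Int) (hb : b ≠ 0) (h : b ∣ a₁ - a₂) :
    PySem.Int.mod a₁ b = PySem.Int.mod a₂ b := by
  have e1 := PySem.Int.floordiv_mul_add_mod a₁ b
  have e2 := PySem.Int.floordiv_mul_add_mod a₂ b
  have hdvd : b ∣ PySem.Int.mod a₁ b - PySem.Int.mod a₂ b := by
    obtain ⟨k, hk⟩ := h
    exact ⟨k - PySem.Int.floordiv a₁ b + PySem.Int.floordiv a₂ b, by linarith [hk]⟩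
  have habs : |PySem.Int.mod a₁ b - PySem.Int.mod a₂ b| < |b| := by
    rcases lt_or_gt_of_ne hb with hneg | hpos
    · have b1 := PySem.Int.mod_neg_bounds a₁ hneg
      have b2 := PySem.Int.mod_neg_bounds a₂ hneg
      rw [abs_of_neg hneg]; rw [abs_lt]; constructor <;> linarith [b1.1, b1.2, b2.1, b2.2]
    · have n1 := PySem.Int.mod_nonneg a₁ hpos
      have l1 := PySem.Int.mod_lt a₁ hpos
      have n2 := PySem.Int.mod_nonneg a₂ hpos
      have l2 := PySem.Int.mod_lt a₂ hpos
      rw [abs_of_pos hpos]; rw [abs_lt]; constructor <;> linarith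
  have := Int.eq_zero_of_abs_lt_dvd ((abs_dvd b _).mpr hdvd) habs
  omega

-- One step of A's loop body, starting from any state congruent to (x0 + dX*k, y0 + dY*k).
theorem simulate_robot_loop (x0 y0 dX dY xsize ysize : Int)
    (hx : xsize ≠ 0) (hy : ysize ≠ 0) (n : Nat) :
    (List.range (n + 1)).foldl
      (fun (s : Int × Int) _ =>
        let x := s.1 + dX
        let y := s.2 + dY
        let x := if x < 0 then x + xsize else x
        let y := if y < 0 then y + ysize else y
        (PySem.Int.mod x xsize, PySem.Int.mod y ysize))
      (x0, y0)
    = (PySem.Int.mod (x0 + dX * (n + 1)) xsize, PySem.Int.mod (y0 + dY * (n + 1)) ysize) := by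
  induction n with
  | zero =>
    simp only [List.range_succ, List.range_zero, List.foldl, List.nil_append, Nat.cast_zero,
      Prod.mk.injEq]
    refine ⟨?_, ?_⟩
    · split_ifs with h
      · exact pymod_congr _ _ _ hx ⟨1, by ring⟩
      · exact congrArg (PySem.Int.mod · xsize) (by ring)
    · split_ifs with h
      · exact pymod_congr _ _ _ hy ⟨1, by ring⟩
      · exact congrArg (PySem.Int.mod · ysize) (by ring)
  | succ n ih =>
    rw [List.range_succ, List.foldl_append, ih]
    simp only [List.foldl_cons, List.foldl_nil, Prod.mk.injEq]
    push_cast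
    refine ⟨?_, ?_⟩
    · have e := PySem.Int.floordiv_mul_add_mod (x0 + dX * (n + 1)) xsize
      split_ifs with h
      · exact pymod_congr _ _ _ hx ⟨1 - PySem.Int.floordiv (x0 + dX * (n + 1)) xsize, by linarith⟩
      · exact pymod_congr _ _ _ hx ⟨- PySem.Int.floordiv (x0 + dX * (n + 1)) xsize, by linarith⟩
    · have e := PySem.Int.floordiv_mul_add_mod (y0 + dY * (n + 1)) ysize
      split_ifs with h
      · exact pymod_congr _ _ _ hy ⟨1 - PySem.Int.floordiv (y0 + dY * (n + 1)) ysize, by linarith⟩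
      · exact pymod_congr _ _ _ hy ⟨- PySem.Int.floordiv (y0 + dY * (n + 1)) ysize, by linarith⟩

-- ===== VERDICT (by name: the statement is the Claim_ definition above) =====
theorem simulate_robot_spec : Claim_equal_simulate_robot := by
  intro robot xsize ysize t _ hpre
  unfold Spec_simulate_robot simulate_robot simulate_robot_alt
  rw [PySem.List.pyRange_one]
  rw [List.foldl_map]
  by_cases ht : t ≤ 0
  · have h0 : t.toNat = 0 := by omega
    simp [h0, ht]
  · have hx := (hpre (by omega)).1
    have hy := (hpre (by omega)).2
    have hn : (t - 0).toNat = (t.toNat - 1) + 1 := by omega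
    rw [hn]
    rw [simulate_robot_loop robot.1.1 robot.1.2 robot.2.1 robot.2.2 xsize ysize hx hy]
    have ht' : ((t.toNat - 1 : Nat) : Int) + 1 = t := by omega
    rw [if_neg ht, ht']
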